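-- pv_equiv track=rewrite | github.com/pypi-data/pypi-mirror-193 | packages/tonkin/tonkin-0.0.1-py3-none-any.whl/tonkin/arrays.py | getSubArrayIndices
-- ===== SOURCE A (Python) =====
-- def shiftArrayLeft(array, shift):
-- 	# Bring large numbers down to smaller equivalents
-- 	# and handle negatives for shifts right
-- 	shift = shift % len(array)
--
-- 	for i in range(0, shift):
-- 		array.append(array.pop(0))
-- 	return array
--
-- def getSubArrayIndices(source, target):
-- 	output = []
--
-- 	# TODO: Ensure that the buffer items don't appear in split
-- 	buffer = [None] * len(target)
--
-- 	for j, i in enumerate(source):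
-- 		buffer = shiftArrayLeft(buffer, 1)
-- 		buffer[-1] = i
--
-- 		if buffer == target:
-- 			output.append(j)
--
-- 	return output
-- ===== SOURCE B (Python) =====
-- def getSubArrayIndices(source, target):
-- 	# Rabin-Karp: rolling hash over a sliding window; slice-compare only on hash hit.
-- 	m = len(target)
-- 	n = len(source)
-- 	if m == 0:
-- 		# empty target matches at every position
-- 		return list(range(n))
-- 	if m > n:
-- 		return []
-- 	B = 1000003
-- 	P = (1 << 61) - 1
-- 	ht = 0
-- 	for x in target:
-- 		ht = (ht * B + x) % P
-- 	pw = pow(B, m, P)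
-- 	h = 0
-- 	output = []
-- 	for j, x in enumerate(source):
-- 		h = (h * B + x) % P
-- 		if j >= m:
-- 			h = (h - source[j - m] * pw) % P
-- 		if j >= m - 1 and h == ht and source[j - m + 1:j + 1] == target:
-- 			output.append(j)
-- 	return output
-- ===== Notes on version B (the rewrite author's own statement) =====
-- stated objective: faster
-- what changed: A slides a rotating buffer (built with pop(0)/append and None padding) along source and compares the whole buffer list to target at every position; B uses Rabin-Karp: a rolling hash over the current window, doing the O(m) slice comparison only on a hash hit.
-- crash fix: A raises ZeroDivisionError whenever target is empty and source is non-empty (shiftArrayLeft computes 1 % len([])); B returns list(range(len(source))) there, since the empty subsequence ends at every index. — e.g. on getSubArrayIndices([1], []): A raises ZeroDivisionError, B returns [0]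
import Mathlib
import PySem

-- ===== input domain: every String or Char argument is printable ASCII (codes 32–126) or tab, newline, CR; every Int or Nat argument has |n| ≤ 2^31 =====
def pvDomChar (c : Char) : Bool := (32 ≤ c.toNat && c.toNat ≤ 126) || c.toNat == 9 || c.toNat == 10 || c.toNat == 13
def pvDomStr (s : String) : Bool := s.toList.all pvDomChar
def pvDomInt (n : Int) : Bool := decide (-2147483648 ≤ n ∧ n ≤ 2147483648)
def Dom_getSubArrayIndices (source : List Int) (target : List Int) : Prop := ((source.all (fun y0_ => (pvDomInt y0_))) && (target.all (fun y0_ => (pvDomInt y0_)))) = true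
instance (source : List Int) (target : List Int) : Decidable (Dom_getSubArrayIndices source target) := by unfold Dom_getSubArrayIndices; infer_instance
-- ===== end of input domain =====

-- B replaces A's per-step rotating-buffer list comparison with Rabin–Karp rolling hashing
-- (slice comparison only on a hash hit); equivalence of the RETURN values is proved on Pre_.

-- ===== PORT A =====
-- for i in range(0, shift): array.append(array.pop(0))   (pop(0) raises on []; unreachable under Pre_)
def pvRotate : Nat → List (Option Int) → List (Option Int)
  | 0, arr => arr
  | _ + 1, [] => []            -- Python would raise IndexError here; outside Pre_
  | n + 1, a :: t => pvRotate n (t ++ [a])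

-- shift = shift % len(array)  (ZeroDivisionError on []; those inputs are outside Pre_)
def pvShiftArrayLeft (array : List (Option Int)) (shift : Int) : List (Option Int) :=
  pvRotate (PySem.Int.mod shift (array.length : Int)).toNat array

def pvAStep (target : List Int) (st : List (Option Int) × List Int) (ji : Int × Int) :
    List (Option Int) × List Int :=
  let buf := pvShiftArrayLeft st.1 1
  let buf2 := buf.dropLast ++ [some ji.2]          -- buffer[-1] = i
  (buf2, if buf2 = target.map some then st.2 ++ [ji.1] else st.2)

def getSubArrayIndices (source : List Int) (target : List Int) : List Int :=
  ((PySem.List.enumerate source).foldl (pvAStep target)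
      (List.replicate target.length none, [])).2

-- ===== PORT B =====
def pvP : Int := 2305843009213693951      -- (1 << 61) - 1

-- h = (h * B + x) % P
def pvHStep (h x : Int) : Int := PySem.Int.mod (h * 1000003 + x) pvP

def pvBStep (source target : List Int) (m : Nat) (ht pw : Int)
    (st : Int × List Int) (ji : Int × Int) : Int × List Int :=
  let h1 := pvHStep st.1 ji.2
  let h := if (m : Int) ≤ ji.1 then
             PySem.Int.mod (h1 - (PySem.List.pyGetD source (ji.1 - (m : Int)) 0) * pw) pvP
           else h1
  (h, if (m : Int) - 1 ≤ ji.1 ∧ h = ht ∧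
        PySem.List.slice source (some (ji.1 - (m : Int) + 1)) (some (ji.1 + 1)) = target
      then st.2 ++ [ji.1] else st.2)

def getSubArrayIndices_alt (source : List Int) (target : List Int) : List Int :=
  let m := target.length
  let n := source.length
  if m = 0 then (List.range n).map (fun k => (k : Int))
  else if n < m then []
  else
    let ht := target.foldl pvHStep 0
    let pw := PySem.Int.powMod 1000003 m pvP
    ((PySem.List.enumerate source).foldl (pvBStep source target m ht pw) (0, [])).2

-- ===== PRECONDITION & SPEC =====
-- Pre_ excludes exactly the inputs where A raises: empty target with nonempty source
-- (shiftArrayLeft does 1 % len([]) → ZeroDivisionError).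
def Pre_getSubArrayIndices (source : List Int) (target : List Int) : Prop :=
  target ≠ [] ∨ source = []
instance (source : List Int) (target : List Int) : Decidable (Pre_getSubArrayIndices source target) := by
  unfold Pre_getSubArrayIndices; infer_instance

def pvWitness_getSubArrayIndices : List Int × List Int := ([1, 2, 1, 2, 3], [1, 2])

-- A raises ZeroDivisionError whenever target = [] and source ≠ []; B returns every index
-- [0, …, len(source)-1] there (the empty subsequence ends at every position).
def Raises_getSubArrayIndices (source : List Int) (target : List Int) : Prop :=
  target = [] ∧ source ≠ []
instance (source : List Int) (target : List Int) : Decidable (Raises_getSubArrayIndices source target) := by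
  unfold Raises_getSubArrayIndices; infer_instance
def pvRaiseWitness_getSubArrayIndices : List Int × List Int := ([1], [])
def pvRaiseWitnessOut_getSubArrayIndices : List Int := [0]

def Spec_getSubArrayIndices (source : List Int) (target : List Int) (out : List Int) : Prop := out = getSubArrayIndices_alt source target
instance (source : List Int) (target : List Int) (out : List Int) : Decidable (Spec_getSubArrayIndices source target out) := by unfold Spec_getSubArrayIndices; infer_instance

-- ===== CLAIM (what is proved, stated in full; the proofs are below) =====
def Claim_equal_getSubArrayIndices : Prop := ∀ (source : List Int) (target : List Int), Dom_getSubArrayIndices source target → Pre_getSubArrayIndices source target → Spec_getSubArrayIndices source target (getSubArrayIndices source target)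
def Claim_raises_getSubArrayIndices : Prop := (∀ (source : List Int) (target : List Int), Dom_getSubArrayIndices source target → Raises_getSubArrayIndices source target → ¬ Pre_getSubArrayIndices source target) ∧ (Dom_getSubArrayIndices (pvRaiseWitness_getSubArrayIndices.1) (pvRaiseWitness_getSubArrayIndices.2) ∧ Raises_getSubArrayIndices (pvRaiseWitness_getSubArrayIndices.1) (pvRaiseWitness_getSubArrayIndices.2) ∧ getSubArrayIndices_alt (pvRaiseWitness_getSubArrayIndices.1) (pvRaiseWitness_getSubArrayIndices.2) = pvRaiseWitnessOut_getSubArrayIndices)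

-- ===== LEMMAS AND PROOFS =====
-- ========== helpers ==========
def pvPad (source : List Int) (m : Nat) : List (Option Int) :=
  List.replicate m none ++ source.map some

def pvBuf (source : List Int) (m k : Nat) : List (Option Int) :=
  ((pvPad source m).drop k).take m

def pvWin (source : List Int) (m k : Nat) : List Int :=
  (source.take (k + 1)).drop (k + 1 - m)

def pvHit (source target : List Int) (k : Nat) : Bool :=
  decide (target.length ≤ k + 1 ∧ pvWin source target.length k = target)

def pvCanon (source target : List Int) : List Int → Nat → List Int
  | [], _ => []
  | _ :: rest, k =>
      (if pvHit source target k then [(k : Int)] else []) ++ pvCanon source target rest (k + 1)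

def pvVal (l : List Int) : Int := l.foldl (fun v x => v * 1000003 + x) 0
def pvHash (l : List Int) : Int := l.foldl pvHStep 0

-- ========== basic facts ==========
lemma pvP_pos : (0:Int) < pvP := by decide

lemma pvStepBuf (b : List (Option Int)) (hb : b ≠ []) (x : Option Int) :
    (pvShiftArrayLeft b 1).dropLast ++ [x] = b.tail ++ [x] := by
  rcases b with _ | ⟨a, t⟩
  · exact absurd rfl hb
  rcases t with _ | ⟨y, t'⟩
  · have h1 : PySem.Int.mod 1 (([a] : List (Option Int)).length : Int) = 0 := by
      rw [show (([a] : List (Option Int)).length : Int) = 1 by simp]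
      decide
    show (pvRotate (PySem.Int.mod 1 (([a] : List (Option Int)).length : Int)).toNat
        [a]).dropLast ++ [x] = [a].tail ++ [x]
    rw [h1]
    rfl
  · have hmod : PySem.Int.mod 1 ((a :: y :: t').length : Int) = 1 := by
      rw [PySem.Int.mod_eq_emod_of_pos (by simp only [List.length_cons]; push_cast; omega)]
      exact Int.emod_eq_of_lt (by norm_num)
        (by simp only [List.length_cons]; push_cast; omega)
    show (pvRotate (PySem.Int.mod 1 ((a :: y :: t').length : Int)).toNat
        (a :: y :: t')).dropLast ++ [x] = (a :: y :: t').tail ++ [x]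
    rw [hmod]
    show ((y :: t') ++ [a]).dropLast ++ [x] = (y :: t') ++ [x]
    rw [List.dropLast_concat]

lemma pvBuf_zero (source : List Int) (m : Nat) : pvBuf source m 0 = List.replicate m none := by
  simp [pvBuf, pvPad]

lemma pvBuf_length (source : List Int) (m k : Nat) (hk : k ≤ source.length) :
    (pvBuf source m k).length = m := by
  simp [pvBuf, pvPad]
  omega

lemma pvBuf_step (source : List Int) (m k : Nat) (hm : 1 ≤ m) (hk : k < source.length) :
    (pvBuf source m k).tail ++ [some source[k]] = pvBuf source m (k + 1) := by
  have hlen : (pvPad source m).length = m + source.length := by simp [pvPad]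
  have htail : (pvBuf source m k).tail = ((pvPad source m).drop (k + 1)).take (m - 1) := by
    rw [pvBuf, ← List.drop_one, List.drop_take, List.drop_drop]
  have hidx : m - 1 < ((pvPad source m).drop (k + 1)).length := by
    rw [List.length_drop, hlen]; omega
  have helem? : ((pvPad source m).drop (k + 1))[m - 1]? = some (some source[k]) := by
    rw [List.getElem?_drop]
    simp only [pvPad]
    rw [List.getElem?_append_right (by simp only [List.length_replicate]; omega)]
    simp only [List.length_replicate]
    rw [show k + 1 + (m - 1) - m = k by omega]
    simp [List.getElem?_eq_getElem hk]
  have helem : ((pvPad source m).drop (k + 1))[m - 1]'hidx = some source[k] :=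
    Option.some.inj ((List.getElem?_eq_getElem hidx).symm.trans helem?)
  rw [show pvBuf source m (k + 1) = ((pvPad source m).drop (k + 1)).take ((m - 1) + 1) by
        rw [pvBuf]; congr 1; omega,
      List.take_succ_eq_append_getElem hidx, htail, helem]

lemma pvWin_eq (source : List Int) (m k : Nat) (hmk : m ≤ k + 1) :
    pvWin source m k = (source.drop (k + 1 - m)).take m := by
  rw [pvWin, List.drop_take]
  congr 1
  omega

lemma pvBuf_eq_iff (source target : List Int) (k : Nat) (hm : 1 ≤ target.length) :
    (pvBuf source target.length (k + 1) = target.map some) ↔ pvHit source target k = true := by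
  by_cases hmk : target.length ≤ k + 1
  · have hbuf : pvBuf source target.length (k + 1)
        = ((source.drop (k + 1 - target.length)).take target.length).map some := by
      have hd : (pvPad source target.length).drop (k + 1)
          = (source.map some).drop (k + 1 - target.length) := by
        conv_lhs => rw [pvPad, show k + 1 = (List.replicate target.length (none : Option Int)).length
              + (k + 1 - target.length) by simp; omega]
        exact List.drop_length_add_append _
      rw [pvBuf, hd, ← List.map_drop, ← List.map_take]
    rw [hbuf, pvHit]
    simp only [decide_eq_true_eq]
    rw [pvWin_eq source target.length k hmk]
    constructor
    · intro h
      exact ⟨hmk, List.map_injective_iff.2 (fun _ _ => Option.some.inj) h⟩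
    · intro h
      rw [h.2]
  · have h1 : pvHit source target k = false := by
      simp only [pvHit, decide_eq_false_iff_not]
      intro h
      omega
    rw [h1]
    simp only [Bool.false_eq_true, iff_false]
    intro hEq
    rcases target with _ | ⟨t0, ts⟩
    · simp at hm
    have hdrop : (pvPad source (t0 :: ts).length).drop (k + 1)
        = List.replicate ((t0 :: ts).length - (k + 1)) none ++ source.map some := by
      rw [pvPad, List.drop_append_of_le_length
            (by simp only [List.length_replicate, List.length_cons]
                simp only [List.length_cons] at hmk
                omega),
          List.drop_replicate]
    obtain ⟨j, hj⟩ : ∃ j, (t0 :: ts).length - (k + 1) = j + 1 :=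
      ⟨(t0 :: ts).length - (k + 1) - 1, by simp only [List.length_cons] at hmk ⊢; omega⟩
    rw [pvBuf, hdrop, hj] at hEq
    simp [List.replicate_succ] at hEq

-- ========== hash facts ==========
lemma pvHStep_emod (a b x : Int) (h : a % pvP = b % pvP) :
    pvHStep a x = (b * 1000003 + x) % pvP := by
  rw [pvHStep, PySem.Int.mod_eq_emod_of_pos pvP_pos]
  have hab : a ≡ b [ZMOD pvP] := by
    unfold Int.ModEq
    exact h
  exact (hab.mul_right 1000003).add_right x

lemma pvHash_acc (l : List Int) : ∀ (a b : Int), a = b % pvP →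
    l.foldl pvHStep a = (l.foldl (fun v x => v * 1000003 + x) b) % pvP := by
  induction l with
  | nil => intro a b h; simpa using h
  | cons y l ih =>
      intro a b h
      simp only [List.foldl]
      apply ih
      apply pvHStep_emod
      rw [h, Int.emod_emod_of_dvd _ dvd_rfl]

lemma pvHash_eq_val (l : List Int) : pvHash l = pvVal l % pvP := by
  exact pvHash_acc l 0 0 (by decide)

lemma pvVal_acc (l : List Int) : ∀ c : Int,
    l.foldl (fun v x => v * 1000003 + x) c = c * 1000003 ^ l.length + pvVal l := by
  induction l with
  | nil => intro c; simp [pvVal]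
  | cons x l ih =>
      intro c
      simp only [List.foldl, List.length_cons, pvVal]
      rw [ih (c * 1000003 + x), ih (0 * 1000003 + x)]
      ring

lemma pvVal_cons (a : Int) (l : List Int) :
    pvVal (a :: l) = a * 1000003 ^ l.length + pvVal l := by
  rw [pvVal, List.foldl_cons, pvVal_acc]
  norm_num

lemma pvHash_append (l : List Int) (x : Int) :
    pvHash (l ++ [x]) = pvHStep (pvHash l) x := by
  simp [pvHash, List.foldl_append]

-- the rolling-hash update: drop the head of a full window, append a new element
lemma pvHash_roll (a x : Int) (T : List Int) (m : Nat) (hT : T.length + 1 = m) :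
    PySem.Int.mod (pvHStep (pvHash (a :: T)) x - a * PySem.Int.powMod 1000003 m pvP) pvP
      = pvHash (T ++ [x]) := by
  rw [PySem.Int.mod_eq_emod_of_pos pvP_pos, PySem.Int.powMod_eq_emod _ _ pvP_pos,
      ← pvHash_append, pvHash_eq_val, pvHash_eq_val]
  have hv : pvVal ((a :: T) ++ [x]) = a * 1000003 ^ m + pvVal (T ++ [x]) := by
    rw [List.cons_append, pvVal_cons]
    congr 2
    simp
    omega
  rw [hv]
  have h1 : a * (1000003 ^ m % pvP) ≡ a * 1000003 ^ m [ZMOD pvP] :=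
    (Int.mod_modEq (1000003 ^ m) pvP).mul_left a
  have h2 : (a * 1000003 ^ m + pvVal (T ++ [x])) % pvP - a * (1000003 ^ m % pvP)
      ≡ a * 1000003 ^ m + pvVal (T ++ [x]) - a * 1000003 ^ m [ZMOD pvP] :=
    (Int.mod_modEq _ pvP).sub h1
  have h3 : a * 1000003 ^ m + pvVal (T ++ [x]) - a * 1000003 ^ m = pvVal (T ++ [x]) := by ring
  rw [h3] at h2
  exact h2

-- ========== loop characterisations ==========
lemma pvA_loop (source target : List Int) (hm : 1 ≤ target.length) :
    ∀ (rest : List Int) (k : Nat) (out : List Int),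
      rest = source.drop k → k ≤ source.length →
      ((PySem.List.enumerate rest (k : Int)).foldl (pvAStep target)
          (pvBuf source target.length k, out)).2
        = out ++ pvCanon source target rest k := by
  intro rest
  induction rest with
  | nil =>
      intro k out _ _
      simp [PySem.List.enumerate_nil, pvCanon]
  | cons x rest ih =>
      intro k out hrest hk
      have hk' : k < source.length := by
        have := congrArg List.length hrest
        simp only [List.length_drop, List.length_cons] at this
        omega
      have hx : source[k] = x := by
        have h1 : (source.drop k)[0]'(by rw [← hrest]; simp) = x := by
          simp [← hrest]
        rw [List.getElem_drop] at h1
        simpa using h1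
      have hrest' : rest = source.drop (k + 1) := by
        have h2 : (source.drop k).tail = rest := by rw [← hrest]; rfl
        rw [List.tail_drop] at h2
        exact h2.symm
      rw [PySem.List.enumerate_cons, List.foldl_cons]
      have hbne : pvBuf source target.length k ≠ [] := by
        have := pvBuf_length source target.length k (le_of_lt hk')
        intro hnil
        rw [hnil] at this
        simp at this
        omega
      have hstep : pvAStep target (pvBuf source target.length k, out) ((k : Int), x)
          = (pvBuf source target.length (k + 1),
             if pvHit source target k then out ++ [(k : Int)] else out) := by
        simp only [pvAStep]
        rw [pvStepBuf _ hbne, ← hx, pvBuf_step source target.length k hm hk']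
        rw [if_congr (pvBuf_eq_iff source target k hm) rfl rfl]
      rw [hstep]
      rw [show (k : Int) + 1 = ((k + 1 : Nat) : Int) by push_cast; ring]
      rw [ih (k + 1) _ hrest' (by omega)]
      rw [pvCanon]
      by_cases hhit : pvHit source target k = true <;> simp [hhit]

lemma pvTakeCons (m : Nat) (hm : 1 ≤ m) (a : Int) (l : List Int) :
    (a :: l).take m = a :: l.take (m - 1) := by
  obtain ⟨m', rfl⟩ : ∃ m', m = m' + 1 := ⟨m - 1, by omega⟩
  simp

lemma pvTakeSnoc (l : List Int) (m : Nat) (hm : 1 ≤ m) (h : m - 1 < l.length) (y : Int)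
    (hy : l[m - 1]'h = y) : l.take m = l.take (m - 1) ++ [y] := by
  conv_lhs => rw [show m = m - 1 + 1 by omega]
  rw [List.take_succ_eq_append_getElem h, hy]

lemma pvHCond (source target : List Int) (x : Int) (k : Nat) (hm : 1 ≤ target.length)
    (hk' : k < source.length) (hx : source[k]'hk' = x) :
    (if (target.length : Int) ≤ (k : Int) then
        PySem.Int.mod (pvHStep (pvHash ((source.take k).drop (k - target.length))) x
            - (PySem.List.pyGetD source ((k : Int) - (target.length : Int)) 0)
              * PySem.Int.powMod 1000003 target.length pvP) pvP
      else pvHStep (pvHash ((source.take k).drop (k - target.length))) x)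
    = pvHash ((source.take (k + 1)).drop (k + 1 - target.length)) := by
  set m := target.length with hmdef
  by_cases hkm : m ≤ k
  · rw [if_pos (by exact_mod_cast hkm)]
    have hcast : (k : Int) - (m : Int) = ((k - m : Nat) : Int) := by omega
    rw [hcast, PySem.List.pyGetD_natCast]
    have hgd : source.getD (k - m) 0 = source[k - m]'(by omega) :=
      List.getD_eq_getElem source 0 (by omega)
    rw [hgd]
    have hWk : (source.take k).drop (k - m)
        = source[k - m]'(by omega) :: ((source.drop (k + 1 - m)).take (m - 1)) := by
      rw [List.drop_take, show k - (k - m) = m by omega,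
          List.drop_eq_getElem_cons (by omega : k - m < source.length),
          pvTakeCons m hm, show k - m + 1 = k + 1 - m by omega]
    have hT : ((source.drop (k + 1 - m)).take (m - 1)).length + 1 = m := by
      simp only [List.length_take, List.length_drop]
      omega
    have hWk1 : (source.take (k + 1)).drop (k + 1 - m)
        = (source.drop (k + 1 - m)).take (m - 1) ++ [x] := by
      rw [List.drop_take, show k + 1 - (k + 1 - m) = m by omega]
      have hidx : m - 1 < (source.drop (k + 1 - m)).length := by
        simp only [List.length_drop]; omega
      refine pvTakeSnoc _ m hm hidx x ?_
      rw [List.getElem_drop]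
      have h9 : k + 1 - m + (m - 1) = k := by omega
      simp only [h9]
      simp [hx]
    rw [hWk, hWk1, pvHash_roll _ _ _ _ hT]
  · rw [if_neg (by exact_mod_cast hkm)]
    have hWk : (source.take k).drop (k - m) = source.take k := by
      rw [show k - m = 0 by omega, List.drop_zero]
    have hWk1 : (source.take (k + 1)).drop (k + 1 - m) = source.take k ++ [x] := by
      rw [show k + 1 - m = 0 by omega, List.drop_zero,
          List.take_succ_eq_append_getElem hk']
      simp [hx]
    rw [hWk, hWk1, pvHash_append]

lemma pvCondIff (source target : List Int) (k : Nat) (hm : 1 ≤ target.length) :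
    ((target.length : Int) - 1 ≤ (k : Int) ∧
      pvHash ((source.take (k + 1)).drop (k + 1 - target.length)) = pvHash target ∧
      PySem.List.slice source (some ((k : Int) - (target.length : Int) + 1))
        (some ((k : Int) + 1)) = target)
    ↔ pvHit source target k = true := by
  set m := target.length with hmdef
  by_cases hk1 : m ≤ k + 1
  · have hslice : PySem.List.slice source (some ((k : Int) - (m : Int) + 1))
        (some ((k : Int) + 1)) = pvWin source m k := by
      rw [show (k : Int) - (m : Int) + 1 = ((k + 1 - m : Nat) : Int) by omega,
          show (k : Int) + 1 = ((k + 1 : Nat) : Int) by push_cast; ring,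
          PySem.List.slice_natCast, pvWin_eq source m k hk1]
      congr 1
      omega
    constructor
    · rintro ⟨-, -, hs⟩
      simp only [pvHit, decide_eq_true_eq]
      exact ⟨hk1, by rw [← hslice]; exact hs⟩
    · intro hhit
      simp only [pvHit, decide_eq_true_eq] at hhit
      refine ⟨by omega, ?_, by rw [hslice]; exact hhit.2⟩
      exact congrArg pvHash hhit.2
  · apply iff_of_false
    · rintro ⟨h1, -, -⟩
      omega
    · simp only [pvHit, decide_eq_true_eq]
      rintro ⟨h1, -⟩
      omega

lemma pvBStep_eq (source target : List Int) (x : Int) (k : Nat) (hm : 1 ≤ target.length)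
    (hk' : k < source.length) (hx : source[k]'hk' = x) :
    pvBStep source target target.length (pvHash target)
        (PySem.Int.powMod 1000003 target.length pvP)
        (pvHash ((source.take k).drop (k - target.length)), out) ((k : Int), x)
      = (pvHash ((source.take (k + 1)).drop (k + 1 - target.length)),
         if pvHit source target k then out ++ [(k : Int)] else out) := by
  simp only [pvBStep]
  rw [pvHCond source target x k hm hk' hx]
  exact congrArg (Prod.mk _) (if_congr (pvCondIff source target k hm) rfl rfl)

lemma pvB_loop (source target : List Int) (hm : 1 ≤ target.length) :
    ∀ (rest : List Int) (k : Nat) (out : List Int),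
      rest = source.drop k → k ≤ source.length →
      ((PySem.List.enumerate rest (k : Int)).foldl
          (pvBStep source target target.length (pvHash target)
            (PySem.Int.powMod 1000003 target.length pvP))
          (pvHash ((source.take k).drop (k - target.length)), out)).2
        = out ++ pvCanon source target rest k := by
  intro rest
  induction rest with
  | nil =>
      intro k out _ _
      simp [PySem.List.enumerate_nil, pvCanon]
  | cons x rest ih =>
      intro k out hrest hk
      have hk' : k < source.length := by
        have := congrArg List.length hrest
        simp only [List.length_drop, List.length_cons] at this
        omega
      have hx : source[k] = x := by
        have h1 : (source.drop k)[0]'(by rw [← hrest]; simp) = x := by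
          simp [← hrest]
        rw [List.getElem_drop] at h1
        simpa using h1
      have hrest' : rest = source.drop (k + 1) := by
        have h2 : (source.drop k).tail = rest := by rw [← hrest]; rfl
        rw [List.tail_drop] at h2
        exact h2.symm
      rw [PySem.List.enumerate_cons, List.foldl_cons]
      have hstep : pvBStep source target target.length (pvHash target)
            (PySem.Int.powMod 1000003 target.length pvP)
            (pvHash ((source.take k).drop (k - target.length)), out) ((k : Int), x)
          = (pvHash ((source.take (k + 1)).drop (k + 1 - target.length)),
             if pvHit source target k then out ++ [(k : Int)] else out) :=
        pvBStep_eq source target x k hm hk' hx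
      rw [hstep]
      rw [show (k : Int) + 1 = ((k + 1 : Nat) : Int) by push_cast; ring]
      rw [ih (k + 1) _ hrest' (by omega)]
      rw [pvCanon]
      by_cases hhit : pvHit source target k = true <;> simp [hhit]

lemma pvHit_false_of_big (source target : List Int) (k : Nat)
    (hn : source.length < target.length) : pvHit source target k = false := by
  simp only [pvHit, decide_eq_false_iff_not]
  rintro ⟨h1, h2⟩
  have hlen := congrArg List.length h2
  simp only [pvWin, List.length_drop, List.length_take] at hlen
  omega

lemma pvCanon_nil_of_big (source target : List Int) (hn : source.length < target.length) :
    ∀ (rest : List Int) (k : Nat), pvCanon source target rest k = [] := by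
  intro rest
  induction rest with
  | nil => intro k; rfl
  | cons x rest ih =>
      intro k
      simp [pvCanon, pvHit_false_of_big source target k hn, ih (k + 1)]

theorem pvMain : ∀ (source target : List Int), (target ≠ [] ∨ source = []) →
    getSubArrayIndices source target = getSubArrayIndices_alt source target := by
  intro source target hpre
  by_cases hm0 : target.length = 0
  · have ht : target = [] := List.length_eq_zero_iff.mp hm0
    subst ht
    rcases hpre with h | h
    · exact absurd rfl h
    · subst h
      decide
  · have hm : 1 ≤ target.length := by omega
    have hA : getSubArrayIndices source target = pvCanon source target source 0 := by
      have h0 := pvA_loop source target hm source 0 [] (by simp) (by omega)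
      rw [pvBuf_zero] at h0
      norm_num at h0
      simp only [getSubArrayIndices]
      exact h0
    have hB : getSubArrayIndices_alt source target = pvCanon source target source 0 := by
      by_cases hnm : source.length < target.length
      · simp only [getSubArrayIndices_alt]
        rw [if_neg hm0, if_pos hnm, pvCanon_nil_of_big source target hnm source 0]
      · simp only [getSubArrayIndices_alt]
        rw [if_neg hm0, if_neg hnm]
        have h0 := pvB_loop source target hm source 0 [] (by simp) (by omega)
        norm_num at h0
        exact h0
    rw [hA, hB]


-- ===== VERDICT (by name: the statement is the Claim_ definition above) =====
theorem getSubArrayIndices_spec : Claim_equal_getSubArrayIndices := by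
  intro source target _ hpre
  show getSubArrayIndices source target = getSubArrayIndices_alt source target
  exact pvMain source target hpre

theorem getSubArrayIndices_raises : Claim_raises_getSubArrayIndices := by
  unfold Claim_raises_getSubArrayIndices
  constructor
  · intro source target _ hr
    unfold Raises_getSubArrayIndices at hr
    unfold Pre_getSubArrayIndices
    rintro (h | h)
    · exact h hr.1
    · exact hr.2 h
  · exact ⟨by decide, by decide, by decide⟩

-- witness self-check: B's port really returns the stated value where A raises
theorem pvRaiseWitness_ok :
    getSubArrayIndices_alt pvRaiseWitness_getSubArrayIndices.1 pvRaiseWitness_getSubArrayIndices.2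
      = pvRaiseWitnessOut_getSubArrayIndices := by
  have h := getSubArrayIndices_raises
  unfold Claim_raises_getSubArrayIndices at h
  exact h.2.2.2
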